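-- pv_equiv track=rewrite | github.com/momozhangcn/GSETRetro | NPRetro_GUI.py | get_pure_route_from_pred_full_route
-- ===== SOURCE A (Python) =====
-- def get_pure_route_from_pred_full_route(full_route):
--     '''
--     :param s: 'smiles1>score1>smiles2|smiles2>score2>smiles3|smiles3>score3>smiles4...'
--     :return: [smiles1, smiles2, smiles3, ...]
--     '''
--     smi_lst = []
--     reaction_lst = full_route.split('|')
--     pure_route = ''
--     for i in range(len(reaction_lst)):
--         line = reaction_lst[i].split('>')
--         if i == 0:
--             smi_lst.append(line[0])
--             pure_route += (line[0]+">")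
--         smi_lst.append(line[-1])
--         pure_route += (line[-1] + ">")
--     pure_route = pure_route.strip(">")
--
--     return smi_lst, pure_route
-- ===== SOURCE B (Python) =====
-- def get_pure_route_from_pred_full_route(full_route):
--     # Single character-level scan: no split() at all. cur holds the chars since the
--     # last separator, `first` captures the prefix before the first separator.
--     smi_lst = []
--     cur = []
--     first = None
--     for ch in full_route:
--         if ch == '>':
--             if first is None:
--                 first = ''.join(cur)
--             cur = []
--         elif ch == '|':
--             tok = ''.join(cur)
--             if first is None:
--                 first = tok
--             smi_lst.append(tok)
--             cur = []
--         else: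
--             cur.append(ch)
--     tok = ''.join(cur)
--     if first is None:
--         first = tok
--     smi_lst.append(tok)
--     smi_lst.insert(0, first)
--     pure_route = '>'.join(smi_lst).strip('>')
--     return smi_lst, pure_route
-- ===== Notes on version B (the rewrite author's own statement) =====
-- stated objective: alternative
-- what changed: B replaces A's split-on-pipe loop with nested split-on-angle-bracket by a single character-level scan over the string with no split calls, maintaining the current token, the prefix before the first separator, and the per-segment last tokens, then joins the collected tokens for pure_route.
import Mathlib
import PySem

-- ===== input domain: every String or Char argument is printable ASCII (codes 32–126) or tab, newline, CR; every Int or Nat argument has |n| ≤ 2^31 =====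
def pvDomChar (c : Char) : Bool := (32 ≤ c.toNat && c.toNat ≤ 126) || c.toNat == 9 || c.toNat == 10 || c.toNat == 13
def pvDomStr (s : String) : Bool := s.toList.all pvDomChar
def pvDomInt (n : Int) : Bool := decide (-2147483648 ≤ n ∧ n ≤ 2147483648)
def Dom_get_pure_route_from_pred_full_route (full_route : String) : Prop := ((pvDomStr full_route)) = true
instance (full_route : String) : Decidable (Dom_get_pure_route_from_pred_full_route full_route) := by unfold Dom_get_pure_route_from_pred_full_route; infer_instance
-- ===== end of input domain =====

-- B replaces A's two-level split passes by a single character-level scan that never calls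
-- split; objective: alternative (same cost, different algorithm).

-- ===== PORT A =====
-- full_route.split('|') / r.split('>'): the separators are nonempty literals, so Str.split? is
-- always `some`; line[0] / line[-1] never raise because str.split always returns a nonempty list,
-- so pyGetD with an (unreachable) default "" is exact here.
def get_pure_route_from_pred_full_route (full_route : String) : List String × String :=
  let reaction_lst := (PySem.Str.split? full_route "|").getD []
  let res := (PySem.List.pyRange 0 (PySem.List.len reaction_lst) 1).foldl
    (fun (st : List String × String) i =>
      let line := (PySem.Str.split? (PySem.List.pyGetD reaction_lst i "") ">").getD []
      let st' := if i = 0 then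
          (st.1 ++ [PySem.List.pyGetD line 0 ""], st.2 ++ (PySem.List.pyGetD line 0 "" ++ ">"))
        else st
      (st'.1 ++ [PySem.List.pyGetD line (-1) ""], st'.2 ++ (PySem.List.pyGetD line (-1) "" ++ ">")))
    ([], "")
  (res.1, PySem.Str.stripChars res.2 ">")

-- ===== PORT B =====
-- Literal port of Source B's character scan: state = (cur, first, smi_lst); ''.join(cur) = String.ofList;
-- smi_lst.insert(0, first) on a list is the cons `first :: …`; bStep is the loop body.
def bStep (st : List Char × Option String × List String) (ch : Char) :
    List Char × Option String × List String :=
  if ch = '>' then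
    ([], (match st.2.1 with | none => some (String.ofList st.1) | some f => some f), st.2.2)
  else if ch = '|' then
    let tok := String.ofList st.1
    ([], (match st.2.1 with | none => some tok | some f => some f), st.2.2 ++ [tok])
  else (st.1 ++ [ch], st.2.1, st.2.2)

def get_pure_route_from_pred_full_route_alt (full_route : String) : List String × String :=
  let st := full_route.toList.foldl bStep ([], none, [])
  let tok := String.ofList st.1
  let first := match st.2.1 with | none => tok | some f => f
  let smi_lst := first :: (st.2.2 ++ [tok])
  (smi_lst, PySem.Str.stripChars (PySem.Str.join ">" smi_lst) ">")

-- ===== PRECONDITION & SPEC =====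
def Spec_get_pure_route_from_pred_full_route (full_route : String) (out : List String × String) : Prop := out = get_pure_route_from_pred_full_route_alt full_route
instance (full_route : String) (out : List String × String) : Decidable (Spec_get_pure_route_from_pred_full_route full_route out) := by unfold Spec_get_pure_route_from_pred_full_route; infer_instance

-- ===== CLAIM (what is proved, stated in full; the proofs are below) =====
def Claim_equal_get_pure_route_from_pred_full_route : Prop := ∀ (full_route : String), Dom_get_pure_route_from_pred_full_route full_route → Spec_get_pure_route_from_pred_full_route full_route (get_pure_route_from_pred_full_route full_route)

-- ===== LEMMAS AND PROOFS =====

-- last token of r.split('>') (A's per-reaction extraction)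
def gTok (r : String) : String :=
  PySem.List.pyGetD ((PySem.Str.split? r ">").getD []) (-1) ""

-- first token of reaction_lst[0].split('>')
def h0S (rs : List String) : String :=
  PySem.List.pyGetD ((PySem.Str.split? (PySem.List.pyGetD rs 0 "") ">").getD []) 0 ""

-- A's accumulated pure_route shape: each smiles followed by '>'
def trailS : List String → String
  | [] => ""
  | x :: xs => x ++ (">" ++ trailS xs)

-- structural (fuel-free) version of split on a single-character separator
def mySplit (c : Char) : List Char → List (List Char)
  | [] => [[]]
  | a :: t => if a = c then [] :: mySplit c t else List.modifyHead (a :: ·) (mySplit c t)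

theorem mySplit_ne_nil (c : Char) (s : List Char) : mySplit c s ≠ [] := by
  induction s with
  | nil => simp [mySplit]
  | cons a t ih =>
    simp only [mySplit]
    split
    · simp
    · cases h : mySplit c t with
      | nil => exact absurd h ih
      | cons x xs => simp [List.modifyHead]

theorem go_eq (c : Char) : ∀ (fuel : Nat) (l cur : List Char) (acc : List (List Char)),
    l.length < fuel →
    PySem.Chars.splitOn.go [c] fuel l cur acc
      = acc.reverse ++ List.modifyHead (cur.reverse ++ ·) (mySplit c l) := by
  intro fuel
  induction fuel with
  | zero => intro l cur acc h; omega
  | succ n ih =>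
    intro l cur acc h
    cases l with
    | nil =>
      rw [PySem.Chars.splitOn.go]
      simp [mySplit]
      omega
    | cons a rest =>
      rw [PySem.Chars.splitOn.go]
      by_cases hc : a = c
      · rw [if_pos (by simp [List.isPrefixOf, hc])]
        have hdrop : List.drop ([c] : List Char).length (a :: rest) = rest := rfl
        rw [hdrop, ih rest [] (cur.reverse :: acc) (by simpa using Nat.lt_of_succ_lt_succ h)]
        have hms' : mySplit c (a :: rest) = [] :: mySplit c rest := by simp [mySplit, hc]
        rw [hms']
        cases hms : mySplit c rest with
        | nil => exact absurd hms (mySplit_ne_nil c rest)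
        | cons x xs => simp [List.modifyHead]
      · rw [if_neg (by simp [List.isPrefixOf]; exact fun he => absurd he.symm hc)]
        rw [ih rest (a :: cur) acc (by simpa using Nat.lt_of_succ_lt_succ h)]
        simp only [mySplit, if_neg hc]
        cases hms : mySplit c rest with
        | nil => exact absurd hms (mySplit_ne_nil c rest)
        | cons x xs => simp [List.modifyHead]

theorem splitOn_eq_mySplit (c : Char) (s : List Char) :
    PySem.Chars.splitOn s [c] = mySplit c s := by
  have := go_eq c (s.length + 1) s [] [] (by omega)
  simp only [PySem.Chars.splitOn] at *
  rw [this]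
  cases hms : mySplit c s with
  | nil => exact absurd hms (mySplit_ne_nil c s)
  | cons x xs => simp [List.modifyHead]

theorem split?_getD (r : String) (c : Char) (sep : String) (hsep : sep.toList = [c]) :
    (PySem.Str.split? r sep).getD [] = (mySplit c r.toList).map String.ofList := by
  simp [PySem.Str.split?, PySem.Chars.split?, hsep, splitOn_eq_mySplit]

theorem mySplit_no_sep (c : Char) (u : List Char) (hu : c ∉ u) : mySplit c u = [u] := by
  induction u with
  | nil => rfl
  | cons a t ih =>
    have hac : a ≠ c := by rintro rfl; simp at hu
    have ht : c ∉ t := fun h => hu (List.mem_cons_of_mem a h)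
    simp [mySplit, hac, ih ht, List.modifyHead]

theorem mySplit_append (c : Char) (u v : List Char) (hu : c ∉ u) :
    mySplit c (u ++ v) = List.modifyHead (u ++ ·) (mySplit c v) := by
  induction u with
  | nil =>
    cases hms : mySplit c v with
    | nil => exact absurd hms (mySplit_ne_nil c v)
    | cons x xs => simp [List.nil_append, hms, List.modifyHead]
  | cons a t ih =>
    have hac : a ≠ c := by rintro rfl; simp at hu
    have ht : c ∉ t := fun h => hu (List.mem_cons_of_mem a h)
    simp only [List.cons_append, mySplit, if_neg hac]
    rw [ih ht]
    cases hms : mySplit c v with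
    | nil => exact absurd hms (mySplit_ne_nil c v)
    | cons x xs => simp [List.modifyHead]

theorem mySplit_append_sep (c : Char) (u v : List Char) (hu : c ∉ u) :
    mySplit c (u ++ c :: v) = u :: mySplit c v := by
  rw [mySplit_append c u (c :: v) hu]
  simp [mySplit, List.modifyHead]

theorem mySplit_headI (c : Char) (s : List Char) :
    (mySplit c s).headI = s.takeWhile (fun a => a ≠ c) := by
  induction s with
  | nil => rfl
  | cons a t ih =>
    by_cases hc : a = c
    · subst hc; simp [mySplit]
    · simp only [mySplit, if_neg hc]
      cases hms : mySplit c t with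
      | nil => exact absurd hms (mySplit_ne_nil c t)
      | cons x xs =>
        simp only [List.modifyHead, List.headI, List.takeWhile_cons]
        rw [hms] at ih
        simp only [List.headI] at ih
        simp [hc, ih]

-- chars after the last '>' of a segment
def tailTok (t : List Char) : List Char := (mySplit '>' t).getLastD []

theorem getLastD_irrel {α : Type} (xs : List α) (d d' : α) (h : xs ≠ []) :
    xs.getLastD d = xs.getLastD d' := by
  cases xs with
  | nil => exact absurd rfl h
  | cons x t => rw [List.getLastD_cons, List.getLastD_cons]

theorem tailTok_no_gt (u : List Char) (hu : '>' ∉ u) : tailTok u = u := by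
  simp [tailTok, mySplit_no_sep '>' u hu]

theorem tailTok_append (u v : List Char) (hu : '>' ∉ u) :
    tailTok (u ++ '>' :: v) = tailTok v := by
  simp only [tailTok, mySplit_append_sep '>' u v hu, List.getLastD_cons]
  exact getLastD_irrel _ u [] (mySplit_ne_nil '>' v)

theorem pyGetD_neg_one {α : Type} (xs : List α) (d : α) (h : xs ≠ []) :
    PySem.List.pyGetD xs (-1) d = xs.getLastD d := by
  simp only [PySem.List.pyGetD, PySem.List.pyGet?, PySem.List.pyIdx?]
  have hlen : 0 < xs.length := List.length_pos_iff.mpr h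
  rw [if_neg (by omega), if_pos (by omega)]
  have hn : xs.length - ((-(-1:Int)).toNat) = xs.length - 1 := by norm_num
  simp only [hn, Option.bind]
  rw [List.getElem?_eq_getElem (by omega)]
  rw [List.getLastD_eq_getLast?, List.getLast?_eq_getElem?]
  rw [List.getElem?_eq_getElem (by omega)]

theorem map_getLastD {α β : Type} (f : α → β) (d : α) (xs : List α) :
    (xs.map f).getLastD (f d) = f (xs.getLastD d) := by
  induction xs generalizing d with
  | nil => rfl
  | cons x t ih => simp only [List.map_cons, List.getLastD_cons]; exact ih x

theorem gTok_ofList (g : List Char) : gTok (String.ofList g) = String.ofList (tailTok g) := by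
  have hsep : (">" : String).toList = ['>'] := rfl
  simp only [gTok, split?_getD (String.ofList g) '>' ">" hsep, tailTok]
  have h1 : (String.ofList g).toList = g := by simp
  rw [h1]
  rw [pyGetD_neg_one _ _ (by simpa using mySplit_ne_nil '>' g)]
  have hd : ("" : String) = String.ofList [] := rfl
  rw [hd, map_getLastD]

-- ===== B's fold, characterized by three standalone recursions =====

def cFun : List Char → List Char → List Char
  | [], cur => cur
  | c :: t, cur => if c = '>' ∨ c = '|' then cFun t [] else cFun t (cur ++ [c])

def sFun : List Char → List Char → List String
  | [], _ => []
  | c :: t, cur =>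
    if c = '>' then sFun t []
    else if c = '|' then String.ofList cur :: sFun t []
    else sFun t (cur ++ [c])

def fFun : List Char → List Char → Option String
  | [], _ => none
  | c :: t, cur => if c = '>' ∨ c = '|' then some (String.ofList cur) else fFun t (cur ++ [c])

theorem fold_some (s : List Char) : ∀ (cur : List Char) (f : String) (smi : List String),
    s.foldl bStep (cur, some f, smi) = (cFun s cur, some f, smi ++ sFun s cur) := by
  induction s with
  | nil => intro cur f smi; simp [cFun, sFun]
  | cons c t ih =>
    intro cur f smi
    by_cases h1 : c = '>'
    · subst h1; simp [bStep, cFun, sFun, ih]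
    · by_cases h2 : c = '|'
      · subst h2; simp [bStep, cFun, sFun, h1, ih]
      · simp [bStep, cFun, sFun, h1, h2, ih]

theorem fold_none (s : List Char) : ∀ (cur : List Char) (smi : List String),
    s.foldl bStep (cur, none, smi) = (cFun s cur, fFun s cur, smi ++ sFun s cur) := by
  induction s with
  | nil => intro cur smi; simp [cFun, sFun, fFun]
  | cons c t ih =>
    intro cur smi
    by_cases h1 : c = '>'
    · subst h1; simp [bStep, cFun, sFun, fFun, fold_some]
    · by_cases h2 : c = '|'
      · subst h2; simp [bStep, cFun, sFun, fFun, h1, fold_some]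
      · simp [bStep, cFun, sFun, fFun, h1, h2, ih]

-- the scan's collected tokens are exactly the per-'|'-segment tail tokens
theorem scan_smi (s : List Char) : ∀ (cur : List Char), '>' ∉ cur → '|' ∉ cur →
    sFun s cur ++ [String.ofList (cFun s cur)]
      = (mySplit '|' (cur ++ s)).map (fun g => String.ofList (tailTok g)) := by
  induction s with
  | nil =>
    intro cur h1 h2
    simp [sFun, cFun, mySplit_no_sep '|' cur h2, tailTok_no_gt cur h1]
  | cons c t ih =>
    intro cur h1 h2
    by_cases hc1 : c = '>'
    · subst hc1
      rw [show sFun ('>' :: t) cur = sFun t [] from by simp [sFun]]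
      rw [show cFun ('>' :: t) cur = cFun t [] from by simp [cFun]]
      rw [ih [] (by simp) (by simp)]
      have hsf : ('|' : Char) ∉ cur ++ ['>'] := by
        intro h; rcases List.mem_append.mp h with h | h
        · exact h2 h
        · simp at h
      have : cur ++ '>' :: t = (cur ++ ['>']) ++ t := by simp
      rw [this, mySplit_append '|' (cur ++ ['>']) t hsf]
      cases hms : mySplit '|' t with
      | nil => exact absurd hms (mySplit_ne_nil '|' t)
      | cons g gs =>
        simp only [List.modifyHead, List.map_cons, List.nil_append]
        have : (cur ++ ['>']) ++ g = cur ++ '>' :: g := by simp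
        rw [this, tailTok_append cur g h1, hms, List.map_cons]
    · by_cases hc2 : c = '|'
      · subst hc2
        rw [show sFun ('|' :: t) cur = String.ofList cur :: sFun t [] from by simp [sFun]]
        rw [show cFun ('|' :: t) cur = cFun t [] from by simp [cFun]]
        rw [mySplit_append_sep '|' cur t h2]
        simp only [List.map_cons, tailTok_no_gt cur h1, List.cons_append]
        rw [ih [] (by simp) (by simp)]
        simp
      · rw [show sFun (c :: t) cur = sFun t (cur ++ [c]) from by simp [sFun, hc1, hc2]]
        rw [show cFun (c :: t) cur = cFun t (cur ++ [c]) from by simp [cFun, hc1, hc2]]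
        have h1' : ('>' : Char) ∉ cur ++ [c] := by
          intro h; rcases List.mem_append.mp h with h | h
          · exact h1 h
          · simp at h; exact hc1 h.symm
        have h2' : ('|' : Char) ∉ cur ++ [c] := by
          intro h; rcases List.mem_append.mp h with h | h
          · exact h2 h
          · simp at h; exact hc2 h.symm
        rw [ih (cur ++ [c]) h1' h2']
        simp

-- the scan's "first" value is the prefix before the first separator
theorem scan_first (s : List Char) : ∀ (cur : List Char), '>' ∉ cur → '|' ∉ cur →
    (match fFun s cur with | none => String.ofList (cFun s cur) | some f => f)
      = String.ofList ((cur ++ s).takeWhile (fun a => a ≠ '>' ∧ a ≠ '|')) := by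
  induction s with
  | nil =>
    intro cur h1 h2
    have hcur : cur.takeWhile (fun a => decide (a ≠ '>' ∧ a ≠ '|')) = cur :=
      List.takeWhile_eq_self_iff.mpr (by
        intro a ha
        simp only [decide_eq_true_eq]
        exact ⟨fun h => h1 (h ▸ ha), fun h => h2 (h ▸ ha)⟩)
    show String.ofList (cFun [] cur) = _
    rw [List.append_nil, hcur]
    rfl
  | cons c t ih =>
    intro cur h1 h2
    have hcur : cur.takeWhile (fun a => decide (a ≠ '>' ∧ a ≠ '|')) = cur :=
      List.takeWhile_eq_self_iff.mpr (by
        intro a ha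
        simp only [decide_eq_true_eq]
        exact ⟨fun h => h1 (h ▸ ha), fun h => h2 (h ▸ ha)⟩)
    by_cases hsep : c = '>' ∨ c = '|'
    · rw [show fFun (c :: t) cur = some (String.ofList cur) from by simp [fFun]; tauto]
      show String.ofList cur = _
      rw [List.takeWhile_append, hcur, if_pos rfl, List.takeWhile_cons,
        if_neg (by simp only [decide_eq_true_eq]; tauto)]
      rw [List.append_nil]
    · push Not at hsep
      rw [show fFun (c :: t) cur = fFun t (cur ++ [c]) from by simp [fFun, hsep.1, hsep.2]]
      rw [show cFun (c :: t) cur = cFun t (cur ++ [c]) from by simp [cFun, hsep.1, hsep.2]]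
      have h1' : ('>' : Char) ∉ cur ++ [c] := by
        intro h; rcases List.mem_append.mp h with h | h
        · exact h1 h
        · simp at h; exact hsep.1 h.symm
      have h2' : ('|' : Char) ∉ cur ++ [c] := by
        intro h; rcases List.mem_append.mp h with h | h
        · exact h2 h
        · simp at h; exact hsep.2 h.symm
      rw [ih (cur ++ [c]) h1' h2']
      simp

-- takeWhile by the two separators in sequence = takeWhile by their conjunction
theorem takeWhile_two (l : List Char) :
    List.takeWhile (fun a => decide (a ≠ '>')) (List.takeWhile (fun a => decide (a ≠ '|')) l)
      = List.takeWhile (fun a => decide (a ≠ '>' ∧ a ≠ '|')) l := by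
  induction l with
  | nil => rfl
  | cons a t ih =>
    by_cases ha2 : a = '|'
    · subst ha2
      rw [List.takeWhile_cons, if_neg (by simp), List.takeWhile_cons,
        if_neg (by simp only [decide_eq_true_eq]; tauto)]
      rfl
    · by_cases ha1 : a = '>'
      · subst ha1
        rw [List.takeWhile_cons, if_pos (by simp [ha2]), List.takeWhile_cons,
          if_neg (by simp), List.takeWhile_cons,
          if_neg (by simp only [decide_eq_true_eq]; tauto)]
      · rw [List.takeWhile_cons, if_pos (by simp [ha2]), List.takeWhile_cons,
          if_pos (by simp [ha1]), List.takeWhile_cons,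
          if_pos (by simp only [decide_eq_true_eq]; tauto), ih]

-- A's first token equals the prefix before the first separator
theorem h0S_eq (s : String) :
    h0S ((PySem.Str.split? s "|").getD [])
      = String.ofList (s.toList.takeWhile (fun a => a ≠ '>' ∧ a ≠ '|')) := by
  have hb : ("|" : String).toList = ['|'] := rfl
  have hg : (">" : String).toList = ['>'] := rfl
  simp only [h0S, split?_getD s '|' "|" hb]
  cases hms : mySplit '|' s.toList with
  | nil => exact absurd hms (mySplit_ne_nil '|' s.toList)
  | cons g gs =>
    have hget : PySem.List.pyGetD ((g :: gs).map String.ofList) 0 "" = String.ofList g := by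
      simp [PySem.List.pyGetD, PySem.List.pyGet?, PySem.List.pyIdx?]
    rw [hget, split?_getD (String.ofList g) '>' ">" hg]
    have h1 : (String.ofList g).toList = g := by simp
    rw [h1]
    cases hms2 : mySplit '>' g with
    | nil => exact absurd hms2 (mySplit_ne_nil '>' g)
    | cons x xs =>
      have hget2 : PySem.List.pyGetD ((x :: xs).map String.ofList) 0 "" = String.ofList x := by
        simp [PySem.List.pyGetD, PySem.List.pyGet?, PySem.List.pyIdx?]
      rw [hget2]
      have hx : x = (mySplit '>' g).headI := by rw [hms2]; rfl
      have hg' : g = (mySplit '|' s.toList).headI := by rw [hms]; rfl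
      rw [hx, mySplit_headI, hg', mySplit_headI]
      exact congrArg String.ofList (takeWhile_two s.toList)

theorem go_ne_nil (sep : List Char) : ∀ (fuel : Nat) (l cur : List Char) (acc : List (List Char)),
    PySem.Chars.splitOn.go sep fuel l cur acc ≠ [] := by
  intro fuel
  induction fuel with
  | zero => intro l cur acc; simp [PySem.Chars.splitOn.go]
  | succ n ih =>
    intro l cur acc
    cases l with
    | nil => simp [PySem.Chars.splitOn.go]
    | cons c rest =>
      rw [PySem.Chars.splitOn.go]
      split
      · exact ih _ _ _
      · exact ih _ _ _

theorem split_bar_ne_nil (s : String) : (PySem.Str.split? s "|").getD [] ≠ [] := by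
  simp [PySem.Str.split?, PySem.Chars.split?]
  exact go_ne_nil _ _ _ _ _

theorem foldF (t : List String) : ∀ (l : List String) (s : String),
    t.foldl (fun (st : List String × String) r => (st.1 ++ [gTok r], st.2 ++ (gTok r ++ ">"))) (l, s)
      = (l ++ t.map gTok, s ++ trailS (t.map gTok)) := by
  induction t with
  | nil => intro l s; simp [trailS]
  | cons x xs ih =>
    intro l s
    simp only [List.foldl_cons, ih, List.map_cons, trailS]
    simp [String.append_assoc]

theorem fold_char (rs : List String) (h : String) (t : List String) (hrs : rs = h :: t) :
    (PySem.List.pyRange 0 (PySem.List.len rs) 1).foldl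
      (fun (st : List String × String) i =>
        let line := (PySem.Str.split? (PySem.List.pyGetD rs i "") ">").getD []
        let st' := if i = 0 then
            (st.1 ++ [PySem.List.pyGetD line 0 ""], st.2 ++ (PySem.List.pyGetD line 0 "" ++ ">"))
          else st
        (st'.1 ++ [PySem.List.pyGetD line (-1) ""], st'.2 ++ (PySem.List.pyGetD line (-1) "" ++ ">")))
      ([], "")
    = (h0S rs :: rs.map gTok, h0S rs ++ (">" ++ trailS (rs.map gTok))) := by
  have hpos : (0:Int) < PySem.List.len rs := by
    simp [PySem.List.len, hrs]
  rw [PySem.List.pyRange_one_cons hpos, List.foldl_cons]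
  simp only [zero_add]
  have hcong : ∀ (st : List String × String), ∀ i ∈ PySem.List.pyRange 1 (PySem.List.len rs) 1,
      (fun (st : List String × String) i =>
        let line := (PySem.Str.split? (PySem.List.pyGetD rs i "") ">").getD []
        let st' := if i = 0 then
            (st.1 ++ [PySem.List.pyGetD line 0 ""], st.2 ++ (PySem.List.pyGetD line 0 "" ++ ">"))
          else st
        (st'.1 ++ [PySem.List.pyGetD line (-1) ""], st'.2 ++ (PySem.List.pyGetD line (-1) "" ++ ">"))) st i
      = (fun (st : List String × String) i =>
          (st.1 ++ [gTok (PySem.List.pyGetD rs i "")], st.2 ++ (gTok (PySem.List.pyGetD rs i "") ++ ">"))) st i := by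
    intro st i hi
    have h1 : (1:Int) ≤ i := (PySem.List.mem_pyRange_one.mp hi).1
    simp only [gTok]
    rw [if_neg (by omega)]
  rw [PySem.List.foldl_congr_mem _ _ _ _ hcong]
  rw [PySem.List.foldl_pyRange_pyGetD rs "" (fun st r => (st.1 ++ [gTok r], st.2 ++ (gTok r ++ ">"))) _ (by norm_num)]
  rw [foldF]
  simp only [hrs, List.map_cons, trailS]
  simp [h0S, gTok, String.append_assoc]

theorem joinT (x : String) (ms : List String) :
    (x ++ (">" ++ trailS ms)).toList = (PySem.Str.join ">" (x :: ms)).toList ++ ['>'] := by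
  induction ms generalizing x with
  | nil => simp [trailS, PySem.Str.toList_join, PySem.Chars.join, List.intercalate]
  | cons y ys ih =>
    have := ih y
    simp only [trailS, String.toList_append] at this ⊢
    rw [this]
    simp [PySem.Str.toList_join, PySem.Chars.join_cons_cons]

theorem stripR (x : List Char) :
    PySem.Chars.stripChars (x ++ ['>']) ['>'] = PySem.Chars.stripChars x ['>'] := by
  simp only [PySem.Chars.stripChars, List.dropWhile_append]
  split
  · next h =>
    simp_all
    exact fun y hy => h y (List.Sublist.mem hy (List.dropWhile_sublist _))
  · next h =>
    simp only [List.reverse_append, List.reverse_cons, List.reverse_nil, List.nil_append,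
      List.singleton_append, List.dropWhile_cons]
    simp

-- B's output, in terms of A's split-based quantities
theorem alt_closed (s : String) :
    get_pure_route_from_pred_full_route_alt s
      = (h0S ((PySem.Str.split? s "|").getD []) :: ((PySem.Str.split? s "|").getD []).map gTok,
         PySem.Str.stripChars
           (PySem.Str.join ">"
             (h0S ((PySem.Str.split? s "|").getD []) :: ((PySem.Str.split? s "|").getD []).map gTok)) ">") := by
  have hb : ("|" : String).toList = ['|'] := rfl
  have hmap : ((PySem.Str.split? s "|").getD []).map gTok
      = (mySplit '|' s.toList).map (fun g => String.ofList (tailTok g)) := by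
    rw [split?_getD s '|' "|" hb, List.map_map]
    exact List.map_congr_left (fun g _ => gTok_ofList g)
  have hfirst : (match (s.toList.foldl bStep ([], none, [])).2.1 with
      | none => String.ofList (s.toList.foldl bStep ([], none, [])).1
      | some f => f) = h0S ((PySem.Str.split? s "|").getD []) := by
    rw [fold_none s.toList [] []]
    have := scan_first s.toList [] (by simp) (by simp)
    simp only [List.nil_append] at this
    rw [this, h0S_eq]
  have hsmi : (s.toList.foldl bStep ([], none, [])).2.2
        ++ [String.ofList (s.toList.foldl bStep ([], none, [])).1]
      = ((PySem.Str.split? s "|").getD []).map gTok := by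
    rw [fold_none s.toList [] []]
    have := scan_smi s.toList [] (by simp) (by simp)
    simp only [List.nil_append] at this ⊢
    rw [this, hmap]
  show ((match (s.toList.foldl bStep ([], none, [])).2.1 with
      | none => String.ofList (s.toList.foldl bStep ([], none, [])).1
      | some f => f)
        :: ((s.toList.foldl bStep ([], none, [])).2.2
              ++ [String.ofList (s.toList.foldl bStep ([], none, [])).1]), _) = _
  rw [hfirst, hsmi]

-- ===== VERDICT (by name: the statement is the Claim_ definition above) =====
theorem get_pure_route_from_pred_full_route_spec : Claim_equal_get_pure_route_from_pred_full_route := by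
  intro full_route _
  unfold Spec_get_pure_route_from_pred_full_route
  rw [alt_closed]
  unfold get_pure_route_from_pred_full_route
  obtain ⟨h, t, hrs⟩ := List.exists_cons_of_ne_nil (split_bar_ne_nil full_route)
  simp only []
  rw [fold_char _ h t hrs]
  refine Prod.ext rfl ?_
  apply String.toList_inj.mp
  rw [PySem.Str.toList_stripChars, PySem.Str.toList_stripChars, joinT]
  rw [show (">" : String).toList = ['>'] from rfl, stripR]
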